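-- pv_equiv track=rewrite | github.com/He11B1azzzer/sorting_algorithms_python | sorts.py | batcher_sort
-- ===== SOURCE A (Python) =====
-- import math
--
-- def batcher_sort(arr):
--     t = int(math.log(len(arr),2))
--     p = 2 ** (t - 1)
--     while p > 0:
--         q = 2 ** (t - 1)
--         r = 0
--         d = p
--         while q >= p:
--             i = 0
--             while i < len(arr) - d:
--                 if arr[i] > arr[i + d]:
--                     arr[i], arr[i + d] = arr[i + d], arr[i]
--                 i += 1
--             d = q - p
--             q = int(q / 2)
--             r = p
--         p = p // 2
--     return arr
-- ===== SOURCE B (Python) =====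
-- import math
--
-- def _gaps(t, s):
--     # comparator distances contributed by p = 2**s, then recursively for smaller p
--     if s < 0:
--         return []
--     return [1 << s] + [(1 << m) - (1 << s) for m in range(t - 1, s, -1)] + _gaps(t, s - 1)
--
-- def _pass(xs, d):
--     # closed form of one gap-d compare-exchange pass: running max per residue
--     # class mod d, then pointwise min against the input shifted by d
--     n = len(xs)
--     M = []
--     for j in range(n):
--         M.append(xs[j] if j < d else max(xs[j], M[j - d]))
--     return [min(M[j], xs[j + d]) if j + d < n else M[j] for j in range(n)]
--
-- def batcher_sort(arr):
--     t = int(math.log(len(arr), 2))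
--     cur = arr
--     for d in _gaps(t, t - 1):
--         cur = _pass(cur, d)
--     arr[:] = cur
--     return arr
-- ===== Notes on version B (the rewrite author's own statement) =====
-- stated objective: alternative
-- what changed: B computes each gap-d pass in closed form - a running-maximum sweep per residue class mod d followed by a pointwise min with the input shifted by d - building fresh lists instead of in-place compare-exchange swaps, with the gap sequence generated by a recursive function instead of A's three nested while-loops over mutating p/q/r/d state.
import Mathlib
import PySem

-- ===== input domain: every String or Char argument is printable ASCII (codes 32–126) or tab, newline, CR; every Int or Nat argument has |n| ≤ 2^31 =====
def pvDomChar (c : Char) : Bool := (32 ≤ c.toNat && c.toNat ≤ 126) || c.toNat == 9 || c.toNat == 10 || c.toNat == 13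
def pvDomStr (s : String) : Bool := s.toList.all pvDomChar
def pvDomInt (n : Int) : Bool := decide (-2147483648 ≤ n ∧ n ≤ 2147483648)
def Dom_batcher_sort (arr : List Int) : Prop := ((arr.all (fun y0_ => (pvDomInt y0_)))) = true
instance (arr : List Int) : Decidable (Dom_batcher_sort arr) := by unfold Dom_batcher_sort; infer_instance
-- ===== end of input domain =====

-- B replaces A's in-place compare-exchange passes by closed-form functional passes
-- (a running-max sweep per residue class, then a pointwise min with the d-shifted
-- input) over a recursively generated gap sequence; same return value on every list
-- of length >= 2 (both Pythons also mutate arr in place to the same final state).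


-- ===== PORT A =====
-- the compare-exchange 'if arr[i] > arr[i+d]: arr[i], arr[i+d] = arr[i+d], arr[i]';
-- indices are in range whenever A reaches this line
def cmpswap (arr : List Int) (i j : Nat) : List Int :=
  if arr.getD i 0 > arr.getD j 0 then (arr.set i (arr.getD j 0)).set j (arr.getD i 0)
  else arr

-- inner 'while i < len(arr) - d' loop of A (len(arr) read live each iteration);
-- fuel is a totality guard only: the loop runs at most len(arr) iterations and every
-- call below supplies that much fuel, so the guard never cuts the loop short.
def innerA (d : Nat) : Nat → Nat → List Int → List Int
  | 0, _, arr => arr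
  | fuel + 1, i, arr =>
    if i < arr.length - d then innerA d fuel (i + 1) (cmpswap arr i (i + d)) else arr

-- middle 'while q >= p' loop of A; fuel is a totality guard only (q halves each
-- iteration, so the supplied q+1 fuel always suffices; A runs this loop only with
-- p > 0, where q ≥ p already implies q > 0).
-- A's variable r is assigned but never read; it is omitted.
def midA (p : Nat) : Nat → Nat → Nat → List Int → List Int
  | 0, _, _, arr => arr
  | fuel + 1, q, d, arr =>
    if p ≤ q ∧ 0 < q then midA p fuel (q / 2) (q - p) (innerA d arr.length 0 arr) else arr

-- outer 'while p > 0' loop of A; fuel is a totality guard only (p halves each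
-- iteration, so the supplied t+1 fuel suffices for the initial p = 2^(t-1)).
def outerA (t : Nat) : Nat → Nat → List Int → List Int
  | 0, _, arr => arr
  | fuel + 1, p, arr =>
    if 0 < p then outerA t fuel (p / 2) (midA p (2 ^ (t - 1) + 1) (2 ^ (t - 1)) p arr) else arr

-- t = int(math.log(len(arr),2)); Nat.log 2 is exact for every length 2 ≤ n < 10^7
-- (checked against CPython); lengths < 2 make the Python raise and are outside Pre_.
def batcher_sort (arr : List Int) : List Int :=
  let t := Nat.log 2 arr.length
  outerA t (t + 1) (2 ^ (t - 1)) arr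

-- ===== PORT B =====
-- port of _gaps(t, s): the Nat argument is s+1, so 0 encodes Python's s = -1 base case
def gapsB (t : Nat) : Nat → List Nat
  | 0 => []
  | s + 1 =>
    (2 ^ s :: (List.range (t - 1 - s)).map (fun k => 2 ^ (t - 1 - k) - 2 ^ s)) ++ gapsB t s

-- port of _pass(xs, d): running-max list M, then the pointwise-min comprehension
def passB (d : Nat) (xs : List Int) : List Int :=
  let n := xs.length
  let M := (List.range n).foldl
    (fun M j => M ++ [if j < d then xs.getD j 0 else max (xs.getD j 0) (M.getD (j - d) 0)]) []
  (List.range n).map (fun j => if j + d < n then min (M.getD j 0) (xs.getD (j + d) 0) else M.getD j 0)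

-- t = int(math.log(len(arr),2)) as in port A (exact for 2 ≤ n < 10^7)
def batcher_sort_alt (arr : List Int) : List Int :=
  let t := Nat.log 2 arr.length
  (gapsB t t).foldl (fun cur d => passB d cur) arr

-- ===== PRECONDITION & SPEC =====
-- Pre_ excludes exactly the lists of length < 2, on which the Python A raises
-- (ValueError for length 0, TypeError for length 1).
def Pre_batcher_sort (arr : List Int) : Prop := 2 ≤ arr.length
instance (arr : List Int) : Decidable (Pre_batcher_sort arr) := by unfold Pre_batcher_sort; infer_instance
def pvWitness_batcher_sort : List Int := [3, 1, 2]

def Spec_batcher_sort (arr : List Int) (out : List Int) : Prop := out = batcher_sort_alt arr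
instance (arr : List Int) (out : List Int) : Decidable (Spec_batcher_sort arr out) := by unfold Spec_batcher_sort; infer_instance

-- ===== CLAIM (what is proved, stated in full; the proofs are below) =====
def Claim_equal_batcher_sort : Prop := ∀ (arr : List Int), Dom_batcher_sort arr → Pre_batcher_sort arr → Spec_batcher_sort arr (batcher_sort arr)

-- ===== LEMMAS AND PROOFS =====

theorem cmpswap_length (arr : List Int) (i j : Nat) :
    (cmpswap arr i j).length = arr.length := by
  unfold cmpswap; split <;> simp

-- one inner pass of A at distance d, as a named step for the fold correspondence
def stepS (a : List Int) (d : Nat) : List Int := innerA d a.length 0 a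

theorem innerA_eq_foldl_range' (d : Nat) :
    ∀ (fuel k i : Nat) (arr : List Int), arr.length - d - i = k → k ≤ fuel →
    innerA d fuel i arr = (List.range' i k).foldl (fun a i => cmpswap a i (i + d)) arr := by
  intro fuel
  induction fuel with
  | zero =>
    intro k i arr hk hle
    have h0 : k = 0 := by omega
    subst h0
    rfl
  | succ fuel ih =>
    intro k i arr hk hle
    cases k with
    | zero =>
      have hno : ¬ i < arr.length - d := by omega
      simp [innerA, hno]
    | succ k =>
      have hlt : i < arr.length - d := by omega
      simp only [innerA, hlt, if_pos, List.range', List.foldl]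
      exact ih k (i + 1) (cmpswap arr i (i + d)) (by rw [cmpswap_length]; omega) (by omega)

theorem innerA_eq_foldl (d : Nat) (arr : List Int) :
    innerA d arr.length 0 arr
      = (List.range (arr.length - d)).foldl (fun a i => cmpswap a i (i + d)) arr := by
  rw [List.range_eq_range']
  exact innerA_eq_foldl_range' d arr.length (arr.length - d) 0 arr (by omega) (by omega)

theorem midA_stop (p fuel q d : Nat) (arr : List Int) (h : ¬ (p ≤ q ∧ 0 < q)) :
    midA p fuel q d arr = arr := by
  cases fuel <;> simp [midA, h]

-- the distance list produced by one middle loop with p = 2^s, starting q = 2^m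
def dsFor (m s d : Nat) : List Nat :=
  d :: (List.range (m - s)).map (fun j => 2 ^ (m - j) - 2 ^ s)

theorem midA_eq_foldl (s : Nat) :
    ∀ (m : Nat), s ≤ m → ∀ (fuel : Nat), m + 1 ≤ fuel → ∀ (d : Nat) (arr : List Int),
    midA (2 ^ s) fuel (2 ^ m) d arr = (dsFor m s d).foldl stepS arr := by
  intro m
  induction m with
  | zero =>
    intro hs fuel hfuel d arr
    interval_cases s
    obtain ⟨f, rfl⟩ : ∃ f, fuel = f + 1 := ⟨fuel - 1, by omega⟩
    have hc : ((2 : Nat) ^ 0 ≤ 2 ^ 0 ∧ 0 < (2 : Nat) ^ 0) := by norm_num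
    simp only [midA, hc, if_pos, and_self]
    norm_num
    rw [midA_stop _ _ _ _ _ (by norm_num)]
    rfl
  | succ m ih =>
    intro hs fuel hfuel d arr
    obtain ⟨f, rfl⟩ : ∃ f, fuel = f + 1 := ⟨fuel - 1, by omega⟩
    have h1 : 2 ^ s ≤ 2 ^ (m + 1) := Nat.pow_le_pow_right (by norm_num) hs
    have h2 : 0 < 2 ^ (m + 1) := Nat.two_pow_pos _
    have hcond : (2 ^ s ≤ 2 ^ (m + 1) ∧ 0 < 2 ^ (m + 1)) := ⟨h1, h2⟩
    simp only [midA, hcond, if_pos, and_self]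
    have hq : 2 ^ (m + 1) / 2 = 2 ^ m := by
      rw [pow_succ, Nat.mul_div_cancel]; norm_num
    rcases Nat.lt_or_ge s (m + 1) with hlt | hge
    · rw [hq, ih (by omega) f (by omega) (2 ^ (m + 1) - 2 ^ s) (innerA d arr.length 0 arr)]
      unfold dsFor
      have hrange : List.range (m + 1 - s) = 0 :: (List.range (m - s)).map (· + 1) := by
        have h : m + 1 - s = (m - s) + 1 := by omega
        simp [h, List.range_succ_eq_map]
      rw [hrange]
      simp only [List.map_cons, List.map_map, List.foldl_cons, Function.comp_def, Nat.sub_zero]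
      have hmap : (List.range (m - s)).map (fun x => 2 ^ (m + 1 - (x + 1)) - 2 ^ s)
          = (List.range (m - s)).map (fun j => 2 ^ (m - j) - 2 ^ s) :=
        List.map_congr_left (fun x _ => by congr 2; omega)
      rw [hmap]
      rfl
    · have hse : s = m + 1 := by omega
      subst hse
      rw [hq]
      rw [midA_stop _ _ _ _ _ (by
        intro hc2
        have := Nat.pow_lt_pow_right (a := 2) one_lt_two (Nat.lt_succ_self m)
        omega)]
      unfold dsFor
      simp [List.foldl, stepS]

theorem outerA_stop (t fuel : Nat) (arr : List Int) : outerA t fuel 0 arr = arr := by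
  cases fuel <;> simp [outerA]

-- concatenated distance lists for the outer loop with p = 2^s, 2^(s-1), …, 1
def dsAll (t : Nat) : Nat → List Nat
  | 0 => dsFor (t - 1) 0 (2 ^ 0)
  | s + 1 => dsFor (t - 1) (s + 1) (2 ^ (s + 1)) ++ dsAll t s

theorem midfuel (t : Nat) : (t - 1) + 1 ≤ 2 ^ (t - 1) + 1 := by
  have := Nat.lt_two_pow_self (n := t - 1)
  omega

theorem outerA_eq_foldl (t : Nat) :
    ∀ (s : Nat), s ≤ t - 1 → ∀ (fuel : Nat), s + 1 ≤ fuel → ∀ (arr : List Int),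
    outerA t fuel (2 ^ s) arr = (dsAll t s).foldl stepS arr := by
  intro s
  induction s with
  | zero =>
    intro _ fuel hfuel arr
    obtain ⟨f, rfl⟩ : ∃ f, fuel = f + 1 := ⟨fuel - 1, by omega⟩
    have h1 : 0 < (2 : Nat) ^ 0 := by norm_num
    simp only [outerA, h1, if_pos]
    norm_num
    rw [outerA_stop]
    exact midA_eq_foldl 0 (t - 1) (by omega) (2 ^ (t - 1) + 1) (midfuel t) 1 arr
  | succ s ih =>
    intro hs fuel hfuel arr
    obtain ⟨f, rfl⟩ : ∃ f, fuel = f + 1 := ⟨fuel - 1, by omega⟩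
    have h2 : 0 < 2 ^ (s + 1) := Nat.two_pow_pos _
    simp only [outerA, h2, if_pos]
    have hq : 2 ^ (s + 1) / 2 = 2 ^ s := by
      rw [pow_succ, Nat.mul_div_cancel]; norm_num
    rw [hq, ih (by omega) f (by omega),
      midA_eq_foldl (s + 1) (t - 1) (by omega) (2 ^ (t - 1) + 1) (midfuel t),
      show dsAll t (s + 1) = dsFor (t - 1) (s + 1) (2 ^ (s + 1)) ++ dsAll t s from rfl,
      List.foldl_append]

-- B's recursively generated gap list equals the concatenation produced by A's loops
theorem gapsB_eq (t : Nat) : ∀ (s : Nat), gapsB t (s + 1) = dsAll t s := by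
  intro s
  induction s with
  | zero => simp [gapsB, dsAll, dsFor]
  | succ s ih =>
    have hstep : gapsB t (s + 1 + 1)
        = (2 ^ (s + 1) :: (List.range (t - 1 - (s + 1))).map
            (fun k => 2 ^ (t - 1 - k) - 2 ^ (s + 1))) ++ gapsB t (s + 1) := rfl
    rw [hstep, ih]
    rfl

-- every gap in B's list is positive
theorem gapsB_pos (t : Nat) : ∀ (s : Nat), ∀ d ∈ gapsB t s, 1 ≤ d := by
  intro s
  induction s with
  | zero => intro d hd; simp [gapsB] at hd
  | succ s ih =>
    intro d hd
    simp only [gapsB, List.mem_append, List.mem_cons, List.mem_map, List.mem_range] at hd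
    rcases hd with (rfl | ⟨k, hk, rfl⟩) | h
    · exact Nat.one_le_two_pow
    · have h1 : 2 ^ s < 2 ^ (t - 1 - k) := Nat.pow_lt_pow_right one_lt_two (by omega)
      omega
    · exact ih d h

-- the running-max value at position j: max of xs over {j, j-d, j-2d, …}
def Mf (d : Nat) (xs : List Int) : Nat → Int
  | j =>
    if j < d ∨ d = 0 then xs.getD j 0
    else max (xs.getD j 0) (Mf d xs (j - d))
  decreasing_by omega

theorem getD_map_range {f : Nat → Int} {n j : Nat} (h : j < n) :
    ((List.range n).map f).getD j 0 = f j := by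
  rw [List.getD_eq_getElem _ _ (by simp [h])]
  simp

-- the foldl that builds M produces exactly the map of Mf
theorem M_eq_map (d : Nat) (hd : 1 ≤ d) (xs : List Int) : ∀ (n : Nat),
    (List.range n).foldl
      (fun M j => M ++ [if j < d then xs.getD j 0 else max (xs.getD j 0) (M.getD (j - d) 0)]) []
    = (List.range n).map (Mf d xs) := by
  intro n
  induction n with
  | zero => rfl
  | succ n ih =>
    rw [List.range_succ, List.foldl_append, ih, List.map_append]
    simp only [List.foldl_cons, List.foldl_nil, List.map_cons, List.map_nil]
    congr 2
    by_cases h : n < d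
    · rw [if_pos h]
      rw [show Mf d xs n = xs.getD n 0 from by rw [Mf]; rw [if_pos (Or.inl h)]]
    · rw [if_neg h, getD_map_range (show n - d < n by omega)]
      rw [show Mf d xs n = max (xs.getD n 0) (Mf d xs (n - d)) from by
        rw [Mf]; rw [if_neg (by omega)]]

-- the array state after i steps of A's inner pass, in closed form
def interA (d : Nat) (xs : List Int) (i : Nat) : List Int :=
  (List.range xs.length).map (fun j =>
    if j < i then min (Mf d xs j) (xs.getD (j + d) 0)
    else if j < i + d then Mf d xs j
    else xs.getD j 0)

theorem interA_length (d : Nat) (xs : List Int) (i : Nat) :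
    (interA d xs i).length = xs.length := by
  simp [interA]

theorem interA_zero (d : Nat) (xs : List Int) : interA d xs 0 = xs := by
  apply List.ext_getElem (by simp [interA_length])
  intro j h1 h2
  simp only [interA, List.getElem_map, List.getElem_range]
  have h2' : j < xs.length := by simpa [interA_length] using h1
  rw [if_neg (by omega)]
  by_cases h : j < d
  · rw [if_pos (by omega)]
    rw [show Mf d xs j = xs.getD j 0 from by rw [Mf]; rw [if_pos (Or.inl h)]]
    rw [List.getD_eq_getElem _ _ h2']
  · rw [if_neg (by omega), List.getD_eq_getElem _ _ h2']

theorem interA_getD (d : Nat) (xs : List Int) (i j : Nat) (h : j < xs.length) :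
    (interA d xs i).getD j 0 =
      (if j < i then min (Mf d xs j) (xs.getD (j + d) 0)
       else if j < i + d then Mf d xs j
       else xs.getD j 0) := by
  unfold interA
  rw [getD_map_range h]

theorem cmpswap_eq (a : List Int) (i j : Nat) (hi : i < a.length) (hj : j < a.length) :
    cmpswap a i j
      = (a.set i (min (a.getD i 0) (a.getD j 0))).set j (max (a.getD i 0) (a.getD j 0)) := by
  unfold cmpswap
  split_ifs with h
  · rw [min_eq_right h.le, max_eq_left h.le]
  · rw [not_lt] at h
    rw [min_eq_left h, max_eq_right h,
      List.getD_eq_getElem _ _ hi, List.getD_eq_getElem _ _ hj,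
      List.set_getElem_self, List.set_getElem_self]

theorem interA_step (d : Nat) (hd : 1 ≤ d) (xs : List Int) (i : Nat)
    (hi : i < xs.length - d) :
    cmpswap (interA d xs i) i (i + d) = interA d xs (i + 1) := by
  have hlen := interA_length d xs i
  have hiL : i < xs.length := by omega
  have hidL : i + d < xs.length := by omega
  have hvi : (interA d xs i).getD i 0 = Mf d xs i := by
    rw [interA_getD d xs i i hiL, if_neg (by omega), if_pos (by omega)]
  have hvj : (interA d xs i).getD (i + d) 0 = xs.getD (i + d) 0 := by
    rw [interA_getD d xs i (i + d) hidL, if_neg (by omega), if_neg (by omega)]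
  rw [cmpswap_eq _ _ _ (by omega) (by omega), hvi, hvj]
  apply List.ext_getElem (by simp [interA_length])
  intro k h1 h2
  have hkL : k < xs.length := by simpa [interA_length] using h2
  have hR : (interA d xs (i + 1))[k] =
      (if k < i + 1 then min (Mf d xs k) (xs.getD (k + d) 0)
       else if k < i + 1 + d then Mf d xs k
       else xs.getD k 0) := by
    simp only [interA, List.getElem_map, List.getElem_range]
  have hL : (interA d xs i)[k] =
      (if k < i then min (Mf d xs k) (xs.getD (k + d) 0)
       else if k < i + d then Mf d xs k
       else xs.getD k 0) := by
    simp only [interA, List.getElem_map, List.getElem_range]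
  rw [hR]
  by_cases hkid : i + d = k
  · subst hkid
    rw [List.getElem_set_self (by simp [interA_length]; omega)]
    rw [if_neg (by omega), if_pos (by omega)]
    rw [show Mf d xs (i + d) = max (xs.getD (i + d) 0) (Mf d xs (i + d - d)) from by
      rw [Mf]; rw [if_neg (by omega)]]
    rw [show i + d - d = i from by omega, max_comm]
  · rw [List.getElem_set_ne hkid]
    by_cases hki : i = k
    · subst hki
      rw [List.getElem_set_self (by simp [interA_length]; omega), if_pos (by omega)]
    · rw [List.getElem_set_ne hki, hL]
      split_ifs with hA hB hC hD <;> first | rfl | omega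

theorem foldl_cmpswap_eq_interA (d : Nat) (hd : 1 ≤ d) (xs : List Int) :
    ∀ (i : Nat), i ≤ xs.length - d →
    (List.range i).foldl (fun a i' => cmpswap a i' (i' + d)) xs = interA d xs i := by
  intro i
  induction i with
  | zero => intro _; simpa using (interA_zero d xs).symm
  | succ i ih =>
    intro h
    rw [List.range_succ, List.foldl_append, ih (by omega)]
    simpa using interA_step d hd xs i (by omega)

-- one inner pass of A equals B's closed-form pass
theorem stepS_eq_passB (d : Nat) (hd : 1 ≤ d) (a : List Int) :
    stepS a d = passB d a := by
  unfold stepS passB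
  rw [innerA_eq_foldl, foldl_cmpswap_eq_interA d hd a (a.length - d) (le_refl _)]
  show interA d a (a.length - d)
      = (List.range a.length).map (fun j =>
          if j + d < a.length
          then min (((List.range a.length).foldl
              (fun M j => M ++ [if j < d then a.getD j 0 else max (a.getD j 0) (M.getD (j - d) 0)]) []).getD j 0)
              (a.getD (j + d) 0)
          else ((List.range a.length).foldl
              (fun M j => M ++ [if j < d then a.getD j 0 else max (a.getD j 0) (M.getD (j - d) 0)]) []).getD j 0)
  rw [M_eq_map d hd a]
  apply List.ext_getElem (by simp [interA_length])
  intro j h1 h2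
  have hj : j < a.length := by simpa [interA_length] using h1
  simp only [interA, List.getElem_map, List.getElem_range]
  rw [getD_map_range hj]
  by_cases hc : j + d < a.length
  · rw [if_pos hc, if_pos (by omega)]
  · rw [if_neg hc, if_neg (by omega), if_pos (by omega)]

-- the two folds agree when every gap is positive
theorem foldl_stepS_eq_passB :
    ∀ (ds : List Nat), (∀ d ∈ ds, 1 ≤ d) → ∀ (a : List Int),
    ds.foldl stepS a = ds.foldl (fun cur d => passB d cur) a := by
  intro ds
  induction ds with
  | nil => intro _ a; rfl
  | cons d rest ih =>
    intro hpos a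
    simp only [List.foldl_cons]
    rw [← stepS_eq_passB d (hpos d (by simp)), ih (fun d' h => hpos d' (by simp [h]))]

theorem gapsB_top (t : Nat) (ht : 1 ≤ t) : gapsB t t = dsAll t (t - 1) := by
  have h := gapsB_eq t (t - 1)
  rwa [show t - 1 + 1 = t from by omega] at h

-- ===== VERDICT (by name: the statement is the Claim_ definition above) =====
theorem batcher_sort_spec : Claim_equal_batcher_sort := by
  intro arr _hdom hpre
  unfold Spec_batcher_sort batcher_sort batcher_sort_alt
  have hn : 2 ≤ arr.length := hpre
  have ht : 1 ≤ Nat.log 2 arr.length := Nat.log_pos (by norm_num) hn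
  set t := Nat.log 2 arr.length with htdef
  rw [outerA_eq_foldl t (t - 1) (le_refl _) (t + 1) (by omega) arr]
  show (dsAll t (t - 1)).foldl stepS arr = (gapsB t t).foldl (fun cur d => passB d cur) arr
  rw [← gapsB_top t ht]
  exact foldl_stepS_eq_passB (gapsB t t) (gapsB_pos t t) arr
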